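-- pv_equiv track=rewrite | github.com/divs-spec/Leetcode-All-Questions | Leetcode Contest/Biweekly Contest 174/Best Reachable Tower.py | bestTower
-- ===== SOURCE A (Python) =====
-- from typing import List
--
-- def bestTower(towers: List[List[int]], center: List[int], radius: int) -> List[int]:
--     best_quality = -1
--     best_x = -1
--     best_y = -1
--
--     cx, cy = center
--
--     for x, y, q in towers:
--         dist = abs(x - cx) + abs(y - cy)
--
--         if dist <= radius:
--             if (
--                 q > best_quality or
--                 (q == best_quality and (x < best_x or (x == best_x and y < best_y)))
--             ):
--                 best_quality = q
--                 best_x = x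
--                 best_y = y
--
--     if best_quality == -1:
--         return [-1, -1]
--
--     return [best_x, best_y]
-- ===== SOURCE B (Python) =====
-- from typing import List
--
-- def bestTower(towers: List[List[int]], center: List[int], radius: int) -> List[int]:
--     cx, cy = center
--     reachable = [(x, y, q) for x, y, q in towers if abs(x - cx) + abs(y - cy) <= radius]
--     if not reachable:
--         return [-1, -1]
--     best_q = max(q for _, _, q in reachable)
--     best_x = min(x for x, _, q in reachable if q == best_q)
--     best_y = min(y for x, y, q in reachable if q == best_q and x == best_x)
--     return [best_x, best_y]
-- ===== Notes on version B (the rewrite author's own statement) =====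
-- stated objective: alternative
-- what changed: Replaces A's single running-best loop (lexicographic compare against a -1 sentinel) with a filter of the reachable towers followed by three aggregate passes: max quality, then min x among the best-quality towers, then min y.
-- intended difference: On inputs where some tower is reachable, every reachable tower has negative quality, and the quality-then-position-best of them is not at coordinates (-1,-1), A returns [-1,-1] because its -1 'no tower yet' sentinel swallows negative qualities, while B returns that best reachable tower's coordinates, the intended answer since a reachable tower exists. — e.g. on bestTower([[0, 0, -5]], [0, 0], 1): A returns [-1, -1], B returns [0, 0]
import Mathlib
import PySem

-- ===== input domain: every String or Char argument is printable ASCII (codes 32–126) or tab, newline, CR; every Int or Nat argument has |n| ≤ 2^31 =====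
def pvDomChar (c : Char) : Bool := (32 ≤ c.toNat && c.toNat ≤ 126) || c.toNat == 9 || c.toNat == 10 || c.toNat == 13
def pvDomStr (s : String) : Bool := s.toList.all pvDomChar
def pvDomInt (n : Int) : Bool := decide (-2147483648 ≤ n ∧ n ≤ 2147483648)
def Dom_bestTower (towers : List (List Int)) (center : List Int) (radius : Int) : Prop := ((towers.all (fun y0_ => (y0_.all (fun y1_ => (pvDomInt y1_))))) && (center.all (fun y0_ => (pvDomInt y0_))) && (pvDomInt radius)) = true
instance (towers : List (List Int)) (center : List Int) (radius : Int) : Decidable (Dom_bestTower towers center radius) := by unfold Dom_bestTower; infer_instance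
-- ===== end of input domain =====

-- B replaces A's single running-best loop by a filter of the reachable towers plus three
-- aggregate passes (max quality, then min x among the best, then min y); same cost class
-- (objective: alternative decomposition), and B considers negative-quality towers too (see D_).

-- Manhattan distance of row t from the center (used by port A's loop test and by D_)
def rowDist (center t : List Int) : Int :=
  |t.getD 0 0 - center.getD 0 0| + |t.getD 1 0 - center.getD 1 0|

-- ===== PORT A =====
-- one loop iteration of A: rows that are not [x, y, q] make Python raise ValueError (excluded by Pre_)
def bestTowerStepA (center : List Int) (radius : Int) (b : Int × Int × Int) (t : List Int) : Int × Int × Int :=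
  match t with
  | [x, y, q] =>
    if rowDist center t ≤ radius then
      if q > b.2.2 ∨ (q = b.2.2 ∧ (x < b.1 ∨ (x = b.1 ∧ y < b.2.1))) then (x, y, q) else b
    else b
  | _ => b

def bestTower (towers : List (List Int)) (center : List Int) (radius : Int) : List Int :=
  match center with
  | [cx, cy] =>
    let b := towers.foldl (bestTowerStepA [cx, cy] radius) (-1, -1, -1)
    if b.2.2 = -1 then [-1, -1] else [b.1, b.2.1]
  | _ => [-1, -1]  -- Python raises ValueError unpacking center; excluded by Pre_

-- ===== PORT B =====
-- the comprehension of Source B: unpacking a row that is not [x, y, q] raises; excluded by Pre_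
def reachTriples (cx cy radius : Int) (towers : List (List Int)) : List (Int × Int × Int) :=
  towers.filterMap (fun t => match t with
    | [x, y, q] => if |x - cx| + |y - cy| ≤ radius then some (x, y, q) else none
    | _ => none)

def bestTower_alt (towers : List (List Int)) (center : List Int) (radius : Int) : List Int :=
  match center with
  | [cx, cy] =>
    let reachable := reachTriples cx cy radius towers
    if reachable = [] then [-1, -1]
    else
      -- max()/min() over nonempty lists; the .getD 0 defaults are unreachable (proved below)
      let bq := (PySem.List.max? (reachable.map (fun t => t.2.2)) (fun v => v)).getD 0
      let bx := (PySem.List.min? ((reachable.filter (fun t => t.2.2 == bq)).map (fun t => t.1)) (fun v => v)).getD 0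
      let by_ := (PySem.List.min? ((reachable.filter (fun t => t.2.2 == bq && t.1 == bx)).map (fun t => t.2.1)) (fun v => v)).getD 0
      [bx, by_]
  | _ => [-1, -1]  -- Python raises ValueError unpacking center; excluded by Pre_

-- ===== PRECONDITION & SPEC =====
-- Pre_ excludes exactly the inputs where both Pythons raise ValueError:
-- center must unpack as [cx, cy] and every tower row as [x, y, q].
def Pre_bestTower (towers : List (List Int)) (center : List Int) (radius : Int) : Prop :=
  center.length = 2 ∧ ∀ t ∈ towers, t.length = 3
instance (towers : List (List Int)) (center : List Int) (radius : Int) : Decidable (Pre_bestTower towers center radius) := by unfold Pre_bestTower; infer_instance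

def pvWitness_bestTower : List (List Int) × List Int × Int := ([[1, 2, 3]], [0, 0], 10)

-- On inputs where the best reachable tower (max quality, then min x, then min y) exists, has
-- negative quality and is not at coordinates (-1, -1), A returns [-1, -1] because its -1
-- "no tower yet" sentinel swallows negative qualities, while B returns that tower's
-- coordinates, the intended answer since a reachable tower does exist.
def D_bestTower (towers : List (List Int)) (center : List Int) (radius : Int) : Prop :=
  ∃ t ∈ towers, rowDist center t ≤ radius ∧ t.getD 2 0 < 0 ∧ t.take 2 ≠ [-1, -1] ∧
    ∀ u ∈ towers, rowDist center u ≤ radius →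
      ¬ [-u.getD 2 0, u.getD 0 0, u.getD 1 0] < [-t.getD 2 0, t.getD 0 0, t.getD 1 0]
instance (towers : List (List Int)) (center : List Int) (radius : Int) : Decidable (D_bestTower towers center radius) := by unfold D_bestTower; infer_instance

def Spec_bestTower (towers : List (List Int)) (center : List Int) (radius : Int) (out : List Int) : Prop := ¬ D_bestTower towers center radius → out = bestTower_alt towers center radius
instance (towers : List (List Int)) (center : List Int) (radius : Int) (out : List Int) : Decidable (Spec_bestTower towers center radius out) := by unfold Spec_bestTower; infer_instance

def pvDiffWitness_bestTower : List (List Int) × List Int × Int := ([[0, 0, -5]], [0, 0], 1)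
def pvDiffWitnessOut_bestTower : (List Int) × (List Int) := ([-1, -1], [0, 0])

-- ===== CLAIM (what is proved, stated in full; the proofs are below) =====
def Claim_unchanged_bestTower : Prop := ∀ (towers : List (List Int)) (center : List Int) (radius : Int), Dom_bestTower towers center radius → Pre_bestTower towers center radius → Spec_bestTower towers center radius (bestTower towers center radius)
def Claim_changed_bestTower : Prop := Dom_bestTower (pvDiffWitness_bestTower.1) (pvDiffWitness_bestTower.2.1) (pvDiffWitness_bestTower.2.2) ∧ Pre_bestTower (pvDiffWitness_bestTower.1) (pvDiffWitness_bestTower.2.1) (pvDiffWitness_bestTower.2.2) ∧ D_bestTower (pvDiffWitness_bestTower.1) (pvDiffWitness_bestTower.2.1) (pvDiffWitness_bestTower.2.2) ∧ bestTower (pvDiffWitness_bestTower.1) (pvDiffWitness_bestTower.2.1) (pvDiffWitness_bestTower.2.2) = pvDiffWitnessOut_bestTower.1 ∧ bestTower_alt (pvDiffWitness_bestTower.1) (pvDiffWitness_bestTower.2.1) (pvDiffWitness_bestTower.2.2) = pvDiffWitnessOut_bestTower.2 ∧ pvDiffWitnessOut_bestTower.1 ≠ pvDiffWitnessOut_bestT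ower.2
def Claim_exact_bestTower : Prop := ∀ (towers : List (List Int)) (center : List Int) (radius : Int), Dom_bestTower towers center radius → Pre_bestTower towers center radius → D_bestTower towers center radius → bestTower towers center radius ≠ bestTower_alt towers center radius

-- ===== LEMMAS AND PROOFS =====

-- proof-side reading of D_'s lex-key comparison over the raw tower rows
def rowBetter (t u : List Int) : Prop :=
  t.getD 2 0 > u.getD 2 0 ∨ (t.getD 2 0 = u.getD 2 0 ∧ (t.getD 0 0 < u.getD 0 0 ∨ (t.getD 0 0 = u.getD 0 0 ∧ t.getD 1 0 < u.getD 1 0)))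
def key3 (t : List Int) : List Int := [-t.getD 2 0, t.getD 0 0, t.getD 1 0]

lemma ltlist3 (a b c d e f : Int) : (([a, b, c] : List Int) < [d, e, f]) ↔ (a < d ∨ (a = d ∧ (b < e ∨ (b = e ∧ c < f)))) := by
  rw [show (([a, b, c] : List Int) < [d, e, f]) = ([a, b, c].lt [d, e, f]) from rfl, List.lt_iff_lex_lt]
  constructor
  · intro h
    cases h with
    | rel h => exact Or.inl h
    | cons h =>
      refine Or.inr ⟨rfl, ?_⟩
      cases h with
      | rel h => exact Or.inl h
      | cons h =>
        refine Or.inr ⟨rfl, ?_⟩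
        cases h with
        | rel h => exact h
        | cons h => cases h
  · rintro (h | ⟨rfl, h | ⟨rfl, h⟩⟩)
    · exact List.Lex.rel h
    · exact List.Lex.cons (List.Lex.rel h)
    · exact List.Lex.cons (List.Lex.cons (List.Lex.rel h))

lemma key3_lt_iff (u t : List Int) : (key3 u < key3 t) ↔ rowBetter u t := by
  unfold key3
  rw [ltlist3]
  unfold rowBetter
  omega

lemma take2_ne (t : List Int) (ht : t.length = 3) :
    (t.take 2 ≠ [-1, -1]) ↔ ¬ (t.getD 0 0 = -1 ∧ t.getD 1 0 = -1) := by
  match t, ht with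
  | [x, y, q], _ => simp [List.take, List.getD]

lemma bestTower_alt_eval (towers : List (List Int)) (cx cy radius : Int) :
    bestTower_alt towers [cx, cy] radius =
      (let reachable := reachTriples cx cy radius towers
       if reachable = [] then [-1, -1]
       else
         let bq := (PySem.List.max? (reachable.map (fun t => t.2.2)) (fun v => v)).getD 0
         let bx := (PySem.List.min? ((reachable.filter (fun t => t.2.2 == bq)).map (fun t => t.1)) (fun v => v)).getD 0
         let by_ := (PySem.List.min? ((reachable.filter (fun t => t.2.2 == bq && t.1 == bx)).map (fun t => t.2.1)) (fun v => v)).getD 0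
         [bx, by_]) := rfl

-- A's update, on already-filtered triples: "replace the best iff strictly lexicographically better"
def lexB (t b : Int × Int × Int) : Prop :=
  t.2.2 > b.2.2 ∨ (t.2.2 = b.2.2 ∧ (t.1 < b.1 ∨ (t.1 = b.1 ∧ t.2.1 < b.2.1)))
def stepP (b t : Int × Int × Int) : Int × Int × Int :=
  if t.2.2 > b.2.2 ∨ (t.2.2 = b.2.2 ∧ (t.1 < b.1 ∨ (t.1 = b.1 ∧ t.2.1 < b.2.1))) then t else b

lemma stepP_pos {b t : Int × Int × Int} (h : lexB t b) : stepP b t = t := by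
  unfold lexB at h; unfold stepP; simp [h]

lemma stepP_neg {b t : Int × Int × Int} (h : ¬ lexB t b) : stepP b t = b := by
  unfold lexB at h; unfold stepP; simp [h]

lemma lexB_trans {a b c : Int × Int × Int} (h1 : lexB a b) (h2 : lexB b c) : lexB a c := by
  obtain ⟨a1, a2, a3⟩ := a; obtain ⟨b1, b2, b3⟩ := b; obtain ⟨c1, c2, c3⟩ := c
  unfold lexB at *; simp only at *; omega

lemma lexB_total {a b c : Int × Int × Int} (h1 : ¬ lexB a b) (h2 : lexB a c) : lexB b c := by
  obtain ⟨a1, a2, a3⟩ := a; obtain ⟨b1, b2, b3⟩ := b; obtain ⟨c1, c2, c3⟩ := c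
  unfold lexB at *; simp only at *; omega

lemma foldl_stepP_mem (l : List (Int × Int × Int)) (b : Int × Int × Int) :
    l.foldl stepP b ∈ b :: l := by
  induction l generalizing b with
  | nil => simp [List.foldl]
  | cons h tl ih =>
    simp only [List.foldl, List.mem_cons]
    by_cases hbh : lexB h b
    · have hs : stepP b h = h := stepP_pos hbh
      have h1 := ih (stepP b h)
      rw [hs] at h1 ⊢
      simp only [List.mem_cons] at h1
      tauto
    · have hs : stepP b h = b := stepP_neg hbh
      have h1 := ih (stepP b h)
      rw [hs] at h1 ⊢
      simp only [List.mem_cons] at h1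
      tauto

lemma foldl_stepP_min (l : List (Int × Int × Int)) (b : Int × Int × Int) :
    ∀ t ∈ b :: l, ¬ lexB t (l.foldl stepP b) := by
  induction l generalizing b with
  | nil =>
    intro t ht
    simp only [List.mem_singleton, List.foldl] at *
    subst ht
    obtain ⟨a1, a2, a3⟩ := t; unfold lexB; simp only; omega
  | cons h tl ih =>
    intro t ht
    simp only [List.mem_cons] at ht
    have ihall := ih (stepP b h)
    by_cases hbh : lexB h b
    · have hs : stepP b h = h := stepP_pos hbh
      rcases ht with rfl | rfl | htl
      · intro hb
        exact ihall h (by simp [hs]) (lexB_trans hbh hb)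
      · exact ihall t (by simp [hs])
      · exact ihall t (by simp [htl])
    · have hs : stepP b h = b := stepP_neg hbh
      rcases ht with rfl | rfl | htl
      · exact ihall t (by simp [hs])
      · intro hh
        exact ihall b (by simp [hs]) (lexB_total hbh hh)
      · exact ihall t (by simp [htl])

lemma rowDist_triple (cx cy x y q : Int) : rowDist [cx, cy] [x, y, q] = |x - cx| + |y - cy| := by
  simp [rowDist]

-- A's fold over the raw rows equals the pure fold over the filtered triples
lemma foldA_commute (cx cy radius : Int) (towers : List (List Int)) (b : Int × Int × Int)
    (hlen : ∀ t ∈ towers, t.length = 3) :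
    towers.foldl (bestTowerStepA [cx, cy] radius) b = (reachTriples cx cy radius towers).foldl stepP b := by
  induction towers generalizing b with
  | nil => rfl
  | cons t ts ih =>
    have ht3 : t.length = 3 := hlen t (by simp)
    obtain ⟨x, y, q, rfl⟩ : ∃ x y q, t = [x, y, q] := by
      match t, ht3 with
      | [x, y, q], _ => exact ⟨x, y, q, rfl⟩
    have hrest : ∀ u ∈ ts, u.length = 3 := fun u hu => hlen u (by simp [hu])
    by_cases hr : |x - cx| + |y - cy| ≤ radius
    · simp only [List.foldl, reachTriples, List.filterMap, bestTowerStepA, rowDist_triple, hr]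
      rw [show (if q > b.2.2 ∨ (q = b.2.2 ∧ (x < b.1 ∨ (x = b.1 ∧ y < b.2.1))) then ((x, y, q) : Int × Int × Int) else b) = stepP b (x, y, q) from rfl]
      exact ih (stepP b (x, y, q)) hrest
    · simp only [List.foldl, reachTriples, List.filterMap, bestTowerStepA, rowDist_triple, hr]
      exact ih b hrest

-- membership in the filtered triples, for well-shaped inputs
lemma mem_reachTriples (cx cy radius : Int) (towers : List (List Int)) (x y q : Int) :
    (x, y, q) ∈ reachTriples cx cy radius towers ↔
      [x, y, q] ∈ towers ∧ |x - cx| + |y - cy| ≤ radius := by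
  unfold reachTriples
  rw [List.mem_filterMap]
  constructor
  · rintro ⟨t, ht, hsome⟩
    match t with
    | [] => simp at hsome
    | [_] => simp at hsome
    | [_, _] => simp at hsome
    | (a :: b :: c :: d :: r) => simp at hsome
    | [a, b, c] =>
      by_cases h : |a - cx| + |b - cy| ≤ radius
      · simp only [if_pos h] at hsome
        injection hsome with h1
        obtain ⟨rfl, rfl, rfl⟩ : a = x ∧ b = y ∧ c = q := by
          have := congrArg Prod.fst h1
          have := congrArg (fun p => p.2.1) h1
          have := congrArg (fun p => p.2.2) h1
          simp_all
        exact ⟨ht, h⟩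
      · simp [if_neg h] at hsome
  · rintro ⟨hmem, hr⟩
    exact ⟨[x, y, q], hmem, by simp [if_pos hr]⟩

-- any row of a well-shaped tower list is [x, y, q]
lemma row_shape {towers : List (List Int)} (hlen : ∀ t ∈ towers, t.length = 3)
    {t : List Int} (ht : t ∈ towers) : ∃ x y q, t = [x, y, q] := by
  have ht3 : t.length = 3 := hlen t ht
  match t, ht3 with
  | [x, y, q], _ => exact ⟨x, y, q, rfl⟩

lemma rowBetter_triple (a b c x y q : Int) :
    rowBetter [a, b, c] [x, y, q] ↔ lexB (a, b, c) (x, y, q) := by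
  simp [rowBetter, lexB]

-- D_ restated with A's three clauses (something reachable, all reachable qualities negative,
-- no maximal reachable tower at (-1, -1)); the backward direction produces the maximal
-- element by folding stepP over the reachable triples
lemma D_iff (towers : List (List Int)) (cx cy radius : Int)
    (hlen : ∀ t ∈ towers, t.length = 3) :
    D_bestTower towers [cx, cy] radius ↔
      ((∃ t ∈ towers, rowDist [cx, cy] t ≤ radius) ∧
       (∀ t ∈ towers, rowDist [cx, cy] t ≤ radius → t.getD 2 0 < 0) ∧
       (∀ t ∈ towers, (rowDist [cx, cy] t ≤ radius ∧ ∀ u ∈ towers, rowDist [cx, cy] u ≤ radius → ¬ rowBetter u t) → ¬ (t.getD 0 0 = -1 ∧ t.getD 1 0 = -1))) := by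
  constructor
  · rintro ⟨t, ht, htr, htq, htc, hmax⟩
    have hmax' : ∀ u ∈ towers, rowDist [cx, cy] u ≤ radius → ¬ rowBetter u t := by
      intro u hu hur hb
      exact hmax u hu hur (by simpa [key3] using (key3_lt_iff u t).2 hb)
    have htc' : ¬ (t.getD 0 0 = -1 ∧ t.getD 1 0 = -1) := (take2_ne t (hlen t ht)).1 htc
    refine ⟨⟨t, ht, htr⟩, ?_, ?_⟩
    · intro u hu hur
      have := hmax' u hu hur
      unfold rowBetter at this; omega
    · rintro t' ht' ⟨ht'r, h'max⟩ hc'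
      have h1 := hmax' t' ht' ht'r
      have h2 := h'max t ht htr
      unfold rowBetter at h1 h2
      exact htc' ⟨by omega, by omega⟩
  · rintro ⟨⟨t0, ht0, ht0r⟩, c2, c3⟩
    obtain ⟨x0, y0, q0, rfl⟩ := row_shape hlen ht0
    rw [rowDist_triple] at ht0r
    have h0 : (x0, y0, q0) ∈ reachTriples cx cy radius towers :=
      (mem_reachTriples cx cy radius towers x0 y0 q0).2 ⟨ht0, ht0r⟩
    cases hcase : reachTriples cx cy radius towers with
    | nil => rw [hcase] at h0; simp at h0
    | cons u0 rest =>
      have hsmem' : rest.foldl stepP u0 ∈ u0 :: rest := foldl_stepP_mem rest u0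
      have hsmin' : ∀ v ∈ u0 :: rest, ¬ lexB v (rest.foldl stepP u0) := foldl_stepP_min rest u0
      set sbest := rest.foldl stepP u0 with hsb
      have hsmem : sbest ∈ reachTriples cx cy radius towers := by rw [hcase]; exact hsmem'
      have hsmin : ∀ v ∈ reachTriples cx cy radius towers, ¬ lexB v sbest := by
        intro v hv; rw [hcase] at hv; exact hsmin' v hv
      obtain ⟨a, b, c⟩ := sbest
      have hmem := (mem_reachTriples cx cy radius towers a b c).1 hsmem
      have hrow : ∀ u ∈ towers, rowDist [cx, cy] u ≤ radius → ¬ rowBetter u [a, b, c] := by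
        intro u humem hur
        obtain ⟨a2, b2, c2, rfl⟩ := row_shape hlen humem
        rw [rowDist_triple] at hur
        rw [rowBetter_triple]
        exact hsmin (a2, b2, c2) ((mem_reachTriples cx cy radius towers a2 b2 c2).2 ⟨humem, hur⟩)
      have habr : rowDist [cx, cy] [a, b, c] ≤ radius := by
        rw [rowDist_triple]; exact hmem.2
      refine ⟨[a, b, c], hmem.1, habr, c2 [a, b, c] hmem.1 habr, ?_, ?_⟩
      · rw [take2_ne [a, b, c] (hlen [a, b, c] hmem.1)]
        exact c3 [a, b, c] hmem.1 ⟨habr, hrow⟩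
      · intro u hu hur hb
        exact hrow u hu hur ((key3_lt_iff u [a, b, c]).1 (by simpa [key3] using hb))

-- A's value when every reachable tower has negative quality: the sentinel survives
lemma foldA_allneg (rl : List (Int × Int × Int)) (hall : ∀ t ∈ rl, t.2.2 < 0) :
    (rl.foldl stepP (-1, -1, -1)).2.2 = -1 := by
  have hmem := foldl_stepP_mem rl (-1, -1, -1)
  have hmin := foldl_stepP_min rl (-1, -1, -1)
  have h0 := hmin (-1, -1, -1) (by simp)
  rcases List.mem_cons.1 hmem with h | h
  · rw [h]
  · have := hall _ h
    set r := rl.foldl stepP (-1, -1, -1)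
    obtain ⟨r1, r2, r3⟩ := r
    unfold lexB at h0; simp only at h0 this ⊢; omega

-- B's value, given any lexicographically minimal element s of the filtered list
lemma alt_eval_of_min (towers : List (List Int)) (cx cy radius : Int)
    (s : Int × Int × Int) (hrmem : s ∈ reachTriples cx cy radius towers)
    (hrmin : ∀ t ∈ reachTriples cx cy radius towers, ¬ lexB t s) :
    bestTower_alt towers [cx, cy] radius = [s.1, s.2.1] := by
  set rl := reachTriples cx cy radius towers with hrl
  have hmax : (PySem.List.max? (rl.map (fun t => t.2.2)) (fun v => v)) = some s.2.2 := by
    obtain ⟨m, hm⟩ : ∃ m, PySem.List.max? (rl.map (fun t => t.2.2)) (fun v => v) = some m := by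
      rcases h : PySem.List.max? (rl.map (fun t => t.2.2)) (fun v => v) with _ | m
      · rw [PySem.List.max?_eq_none_iff] at h
        rw [List.map_eq_nil_iff] at h
        rw [h] at hrmem; simp at hrmem
      · exact ⟨m, h⟩
    have hmmem := PySem.List.max?_mem hm
    obtain ⟨u, humem, huq⟩ := List.mem_map.1 hmmem
    have h1 : m ≤ s.2.2 := by
      have := hrmin u humem
      obtain ⟨u1, u2, u3⟩ := u
      unfold lexB at this; simp only at this huq; omega
    have h2 : s.2.2 ≤ m := PySem.List.max?_isMax hm s.2.2 (List.mem_map.2 ⟨s, hrmem, rfl⟩)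
    rw [hm]; congr 1; omega
  have hminx : (PySem.List.min? ((rl.filter (fun t => t.2.2 == s.2.2)).map (fun t => t.1)) (fun v => v)) = some s.1 := by
    have hrfil : s ∈ rl.filter (fun t => t.2.2 == s.2.2) := List.mem_filter.2 ⟨hrmem, by simp⟩
    obtain ⟨m, hm⟩ : ∃ m, PySem.List.min? ((rl.filter (fun t => t.2.2 == s.2.2)).map (fun t => t.1)) (fun v => v) = some m := by
      rcases h : PySem.List.min? ((rl.filter (fun t => t.2.2 == s.2.2)).map (fun t => t.1)) (fun v => v) with _ | m
      · rw [PySem.List.min?_eq_none_iff] at h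
        rw [List.map_eq_nil_iff] at h
        rw [h] at hrfil; simp at hrfil
      · exact ⟨m, h⟩
    have hmmem := PySem.List.min?_mem hm
    obtain ⟨u, humem, hux⟩ := List.mem_map.1 hmmem
    obtain ⟨humem', huq⟩ := List.mem_filter.1 humem
    have huq' : u.2.2 = s.2.2 := by simpa using huq
    have h1 : s.1 ≤ m := by
      have := hrmin u humem'
      obtain ⟨u1, u2, u3⟩ := u
      unfold lexB at this; simp only at this hux huq'; omega
    have h2 : m ≤ s.1 := PySem.List.min?_isMin hm s.1 (List.mem_map.2 ⟨s, hrfil, rfl⟩)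
    rw [hm]; congr 1; omega
  have hminy : (PySem.List.min? ((rl.filter (fun t => t.2.2 == s.2.2 && t.1 == s.1)).map (fun t => t.2.1)) (fun v => v)) = some s.2.1 := by
    have hrfil : s ∈ rl.filter (fun t => t.2.2 == s.2.2 && t.1 == s.1) := List.mem_filter.2 ⟨hrmem, by simp⟩
    obtain ⟨m, hm⟩ : ∃ m, PySem.List.min? ((rl.filter (fun t => t.2.2 == s.2.2 && t.1 == s.1)).map (fun t => t.2.1)) (fun v => v) = some m := by
      rcases h : PySem.List.min? ((rl.filter (fun t => t.2.2 == s.2.2 && t.1 == s.1)).map (fun t => t.2.1)) (fun v => v) with _ | m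
      · rw [PySem.List.min?_eq_none_iff] at h
        rw [List.map_eq_nil_iff] at h
        rw [h] at hrfil; simp at hrfil
      · exact ⟨m, h⟩
    have hmmem := PySem.List.min?_mem hm
    obtain ⟨u, humem, huy⟩ := List.mem_map.1 hmmem
    obtain ⟨humem', huq⟩ := List.mem_filter.1 humem
    have huq' : u.2.2 = s.2.2 ∧ u.1 = s.1 := by simpa using huq
    have h1 : s.2.1 ≤ m := by
      have := hrmin u humem'
      obtain ⟨u1, u2, u3⟩ := u
      unfold lexB at this; simp only at this huy huq'; omega
    have h2 : m ≤ s.2.1 := PySem.List.min?_isMin hm s.2.1 (List.mem_map.2 ⟨s, hrfil, rfl⟩)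
    rw [hm]; congr 1; omega
  have hne : (rl = []) ↔ False := by
    constructor
    · intro h; rw [h] at hrmem; simp at hrmem
    · intro h; exact h.elim
  conv_lhs => rw [bestTower_alt_eval]
  rw [← hrl]
  simp only [hne, if_false, hmax, Option.getD_some, hminx, hminy]

-- the A-side running best, abbreviated
lemma bestTower_eval (towers : List (List Int)) (cx cy radius : Int)
    (hlen : ∀ t ∈ towers, t.length = 3) :
    bestTower towers [cx, cy] radius =
      (if ((reachTriples cx cy radius towers).foldl stepP (-1, -1, -1)).2.2 = -1 then [-1, -1]
       else [((reachTriples cx cy radius towers).foldl stepP (-1, -1, -1)).1,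
             ((reachTriples cx cy radius towers).foldl stepP (-1, -1, -1)).2.1]) := by
  show (if (towers.foldl (bestTowerStepA [cx, cy] radius) (-1, -1, -1)).2.2 = -1 then [-1, -1]
        else [(towers.foldl (bestTowerStepA [cx, cy] radius) (-1, -1, -1)).1,
              (towers.foldl (bestTowerStepA [cx, cy] radius) (-1, -1, -1)).2.1]) = _
  rw [foldA_commute cx cy radius towers _ hlen]

-- ===== VERDICT (by name: the statement is the Claim_ definition above) =====
theorem bestTower_spec : Claim_unchanged_bestTower := by
  intro towers center radius _hdom hpre hnd
  obtain ⟨hc2, hlen⟩ := hpre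
  obtain ⟨cx, cy, rfl⟩ : ∃ cx cy, center = [cx, cy] := by
    match center, hc2 with
    | [cx, cy], _ => exact ⟨cx, cy, rfl⟩
  rw [D_iff towers cx cy radius hlen] at hnd
  show bestTower towers [cx, cy] radius = bestTower_alt towers [cx, cy] radius
  cases hcase : reachTriples cx cy radius towers with
  | nil =>
    -- nothing reachable: both return [-1, -1]
    rw [bestTower_eval towers cx cy radius hlen, bestTower_alt_eval, hcase]
    simp
  | cons t0 rest =>
    -- some tower is reachable
    have hA1 : ∃ t ∈ towers, rowDist [cx, cy] t ≤ radius := by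
      obtain ⟨x, y, q⟩ := t0
      have := (mem_reachTriples cx cy radius towers x y q).1 (by rw [hcase]; simp)
      exact ⟨[x, y, q], this.1, by rw [rowDist_triple]; exact this.2⟩
    by_cases hq : ∃ u ∈ reachTriples cx cy radius towers, 0 ≤ u.2.2
    · -- a reachable tower of nonnegative quality exists: A's sentinel is harmless
      obtain ⟨u0, hu0mem, hu0q⟩ := hq
      set rl := reachTriples cx cy radius towers with hrl
      set r := rl.foldl stepP (-1, -1, -1) with hr
      have hrmem' : r ∈ (-1, -1, -1) :: rl := foldl_stepP_mem rl (-1, -1, -1)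
      have hrmin' : ∀ t ∈ ((-1, -1, -1) : Int × Int × Int) :: rl, ¬ lexB t r := foldl_stepP_min rl (-1, -1, -1)
      have hu0 : ¬ lexB u0 r := hrmin' u0 (by simp [hu0mem])
      have hrq : 0 ≤ r.2.2 := by
        obtain ⟨u1, u2, u3⟩ := u0
        unfold lexB at hu0; simp only at hu0 hu0q; omega
      have hrmem : r ∈ rl := by
        rcases List.mem_cons.1 hrmem' with h | h
        · rw [h] at hrq; simp at hrq
        · exact h
      have hrmin : ∀ t ∈ rl, ¬ lexB t r := fun t ht => hrmin' t (by simp [ht])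
      rw [bestTower_eval towers cx cy radius hlen, ← hrl, ← hr,
        if_neg (by omega : ¬ (r.2.2 = -1)),
        alt_eval_of_min towers cx cy radius r hrmem hrmin]
    · -- every reachable tower has negative quality: ¬ D_ says the best one sits at (-1,-1)
      push Not at hq
      have hA2 : ∀ t ∈ towers, rowDist [cx, cy] t ≤ radius → t.getD 2 0 < 0 := by
        intro t htmem htr
        obtain ⟨x, y, q, rfl⟩ := row_shape hlen htmem
        rw [rowDist_triple] at htr
        have hmem : (x, y, q) ∈ reachTriples cx cy radius towers :=
          (mem_reachTriples cx cy radius towers x y q).2 ⟨htmem, htr⟩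
        simpa using hq (x, y, q) hmem
      have hallneg : ∀ t ∈ reachTriples cx cy radius towers, t.2.2 < 0 := by
        intro t ht
        have := hq t ht; omega
      have hnA3 : ¬ (∀ t ∈ towers, (rowDist [cx, cy] t ≤ radius ∧ ∀ u ∈ towers, rowDist [cx, cy] u ≤ radius → ¬ rowBetter u t) → ¬ (t.getD 0 0 = -1 ∧ t.getD 1 0 = -1)) := by
        intro h3
        exact hnd ⟨hA1, hA2, h3⟩
      push Not at hnA3
      obtain ⟨t, htmem, ⟨htr, htmaxl⟩, htc⟩ := hnA3
      obtain ⟨x, y, q, rfl⟩ := row_shape hlen htmem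
      simp only [List.getD] at htc
      obtain ⟨hx, hy⟩ : x = -1 ∧ y = -1 := by simpa using htc
      rw [rowDist_triple] at htr
      have htin : (x, y, q) ∈ reachTriples cx cy radius towers :=
        (mem_reachTriples cx cy radius towers x y q).2 ⟨htmem, htr⟩
      have htmin : ∀ v ∈ reachTriples cx cy radius towers, ¬ lexB v (x, y, q) := by
        intro v hv
        obtain ⟨a, b, c⟩ := v
        have hmem := (mem_reachTriples cx cy radius towers a b c).1 hv
        have := htmaxl [a, b, c] hmem.1 (by rw [rowDist_triple]; exact hmem.2)
        rwa [rowBetter_triple] at this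
      -- B returns the coordinates of the best reachable tower: (x, y) = (-1, -1)
      rw [alt_eval_of_min towers cx cy radius (x, y, q) htin htmin]
      rw [bestTower_eval towers cx cy radius hlen,
        if_pos (foldA_allneg (reachTriples cx cy radius towers) hallneg)]
      simp [hx, hy]

theorem bestTower_changed : Claim_changed_bestTower := by unfold Claim_changed_bestTower; decide

theorem bestTower_tight : Claim_exact_bestTower := by
  intro towers center radius _hdom hpre hd
  obtain ⟨hc2, hlen⟩ := hpre
  obtain ⟨cx, cy, rfl⟩ : ∃ cx cy, center = [cx, cy] := by
    match center, hc2 with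
    | [cx, cy], _ => exact ⟨cx, cy, rfl⟩
  rw [D_iff towers cx cy radius hlen] at hd
  obtain ⟨⟨t, htmem, htr⟩, hA2, hA3⟩ := hd
  obtain ⟨x, y, q, rfl⟩ := row_shape hlen htmem
  rw [rowDist_triple] at htr
  have htin : (x, y, q) ∈ reachTriples cx cy radius towers :=
    (mem_reachTriples cx cy radius towers x y q).2 ⟨htmem, htr⟩
  have hallneg : ∀ v ∈ reachTriples cx cy radius towers, v.2.2 < 0 := by
    intro v hv
    obtain ⟨a, b, c⟩ := v
    have hmem := (mem_reachTriples cx cy radius towers a b c).1 hv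
    have := hA2 [a, b, c] hmem.1 (by rw [rowDist_triple]; exact hmem.2)
    simpa using this
  -- A returns [-1, -1]
  rw [bestTower_eval towers cx cy radius hlen,
    if_pos (foldA_allneg (reachTriples cx cy radius towers) hallneg)]
  -- B returns the best reachable tower's coordinates, which D_ says are not (-1, -1)
  cases hcase : reachTriples cx cy radius towers with
  | nil => rw [hcase] at htin; simp at htin
  | cons t0 rest =>
    have hsmem' : rest.foldl stepP t0 ∈ t0 :: rest := foldl_stepP_mem rest t0
    have hsmin' : ∀ v ∈ t0 :: rest, ¬ lexB v (rest.foldl stepP t0) := foldl_stepP_min rest t0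
    set s := rest.foldl stepP t0 with hs
    have hsmem : s ∈ reachTriples cx cy radius towers := by rw [hcase]; exact hsmem'
    have hsmin : ∀ v ∈ reachTriples cx cy radius towers, ¬ lexB v s := by
      intro v hv; rw [hcase] at hv; exact hsmin' v hv
    rw [alt_eval_of_min towers cx cy radius s hsmem hsmin]
    obtain ⟨a, b, c⟩ := s
    have hmem := (mem_reachTriples cx cy radius towers a b c).1 hsmem
    have hrow : ∀ u ∈ towers, rowDist [cx, cy] u ≤ radius → ¬ rowBetter u [a, b, c] := by
      intro u humem hur
      obtain ⟨a2, b2, c2, rfl⟩ := row_shape hlen humem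
      rw [rowDist_triple] at hur
      rw [rowBetter_triple]
      exact hsmin (a2, b2, c2) ((mem_reachTriples cx cy radius towers a2 b2 c2).2 ⟨humem, hur⟩)
    have hnc := hA3 [a, b, c] hmem.1 ⟨by rw [rowDist_triple]; exact hmem.2, hrow⟩
    have hnc' : ¬ (a = -1 ∧ b = -1) := by simpa using hnc
    intro heq
    simp only at heq
    have : a = -1 ∧ b = -1 := by
      have h0 := congrArg (fun l : List Int => l.getD 0 0) heq
      have h1 := congrArg (fun l : List Int => l.getD 1 0) heq
      simp at h0 h1
      omega
    exact hnc' this
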